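-- pv_equiv track=rewrite | github.com/AndyVitoria/Engenharia-de-Software | src/extrai_dificuldade.py | calculaTotal
-- ===== SOURCE A (Python) =====
-- def calculaTotal(dicionario_Disciplinas):
--     dicionario_Total = {}
--
--     for chave in dict.keys(dicionario_Disciplinas):
--         # Ignora o estado do aluno (Cursando, Aprovado, Reprovado e etc.) e calcula o total de alunos das disciplinas
--         if chave[0] in dict.keys(dicionario_Total):
--             dicionario_Total[chave[0]] += dicionario_Disciplinas[chave][0]
--         else:
--             dicionario_Total[chave[0]] = dicionario_Disciplinas[chave][0]
--
--     return dicionario_Total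
-- ===== SOURCE B (Python) =====
-- def calculaTotal(dicionario_Disciplinas):
--     # Two-pass decomposition: first collect the distinct discipline prefixes in
--     # first-occurrence order, then build the result with one filtered sum per prefix.
--     prefixos = []
--     for chave in dicionario_Disciplinas:
--         if chave[0] not in prefixos:
--             prefixos.append(chave[0])
--     return {p: sum(valor[0] for chave, valor in dicionario_Disciplinas.items() if chave[0] == p)
--             for p in prefixos}
-- ===== Notes on version B (the rewrite author's own statement) =====
-- stated objective: alternative
-- what changed: A builds the totals dict in one incremental pass with a membership-test-and-update per key; B first collects the distinct prefixes in first-occurrence order and then computes each total as one filtered sum over all entries. Pre_ excludes association lists with duplicate (discipline,state) keys, which do not represent a Python dict, and entries whose count list is empty, on which A raises IndexError.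
import Mathlib
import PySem

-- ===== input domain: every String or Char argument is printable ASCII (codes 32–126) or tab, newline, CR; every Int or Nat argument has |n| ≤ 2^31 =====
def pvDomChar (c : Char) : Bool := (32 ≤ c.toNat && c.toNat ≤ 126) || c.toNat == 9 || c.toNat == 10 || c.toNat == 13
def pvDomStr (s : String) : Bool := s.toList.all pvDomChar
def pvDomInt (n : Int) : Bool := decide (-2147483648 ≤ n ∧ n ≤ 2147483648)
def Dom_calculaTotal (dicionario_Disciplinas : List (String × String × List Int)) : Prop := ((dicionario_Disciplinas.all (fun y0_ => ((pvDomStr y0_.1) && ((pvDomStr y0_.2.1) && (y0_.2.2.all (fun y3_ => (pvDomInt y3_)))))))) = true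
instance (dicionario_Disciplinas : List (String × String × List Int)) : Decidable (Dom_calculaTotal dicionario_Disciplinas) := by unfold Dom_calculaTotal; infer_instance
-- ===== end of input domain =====

-- B replaces A's single incremental membership-test-and-update pass by a dedup pass over the
-- prefixes followed by one filtered sum per prefix (objective: alternative decomposition).

-- ===== PORT A =====
-- A iterates over the dict's keys, looks each key up and accumulates value[0] under key[0].
def calculaTotal (dicionario_Disciplinas : List (String × String × List Int)) : List (String × Int) :=
  (dicionario_Disciplinas.foldl
    (fun (dicionario_Total : PySem.Dict String Int) chave =>
      -- dicionario_Disciplinas[chave][0]; the '.getD []' / '.getD 0' defaults stand where Python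
      -- would raise (KeyError impossible, IndexError on an empty value list — excluded by Pre_)
      let v : Int :=
        (PySem.List.pyGet?
          (((dicionario_Disciplinas.find?
              (fun e => e.1 == chave.1 && e.2.1 == chave.2.1)).map (·.2.2)).getD []) 0).getD 0
      if dicionario_Total.contains chave.1 then
        dicionario_Total.insert chave.1 (dicionario_Total.getD chave.1 0 + v)
      else
        dicionario_Total.insert chave.1 v)
    PySem.Dict.empty).items

-- ===== PORT B =====
-- first pass: distinct prefixes in first-occurrence order; then one filtered sum per prefix.
def calculaTotal_alt (dicionario_Disciplinas : List (String × String × List Int)) : List (String × Int) :=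
  let prefixos : PySem.Set String :=
    dicionario_Disciplinas.foldl (fun ps chave => PySem.Set.add ps chave.1) PySem.Set.empty
  prefixos.map (fun p =>
    (p, (dicionario_Disciplinas.filter (fun chave => chave.1 == p)).foldl
          (fun acc chave => acc + (PySem.List.pyGet? chave.2.2 0).getD 0) 0))

-- ===== PRECONDITION & SPEC =====
-- Pre_ excludes association lists with duplicate (discipline,state) keys, which do not represent
-- a Python dict, and entries whose count list is empty, on which A raises IndexError.
def Pre_calculaTotal (dicionario_Disciplinas : List (String × String × List Int)) : Prop :=
  (dicionario_Disciplinas.map (fun e => (e.1, e.2.1))).Nodup ∧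
  ∀ e ∈ dicionario_Disciplinas, e.2.2 ≠ []
instance (dicionario_Disciplinas : List (String × String × List Int)) : Decidable (Pre_calculaTotal dicionario_Disciplinas) := by unfold Pre_calculaTotal; infer_instance

def pvWitness_calculaTotal : (List (String × String × List Int)) :=
  [("MAT", "Aprovado", [3]), ("MAT", "Reprovado", [2, 1]), ("FIS", "Cursando", [5])]

def Spec_calculaTotal (dicionario_Disciplinas : List (String × String × List Int)) (out : List (String × Int)) : Prop := out = calculaTotal_alt dicionario_Disciplinas
instance (dicionario_Disciplinas : List (String × String × List Int)) (out : List (String × Int)) : Decidable (Spec_calculaTotal dicionario_Disciplinas out) := by unfold Spec_calculaTotal; infer_instance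

-- ===== CLAIM (what is proved, stated in full; the proofs are below) =====
def Claim_equal_calculaTotal : Prop := ∀ (dicionario_Disciplinas : List (String × String × List Int)), Dom_calculaTotal dicionario_Disciplinas → Pre_calculaTotal dicionario_Disciplinas → Spec_calculaTotal dicionario_Disciplinas (calculaTotal dicionario_Disciplinas)

-- ===== LEMMAS AND PROOFS =====

-- head of the count list (the value both programs read, once Pre_ is known)
def pvHead (e : String × String × List Int) : Int := e.2.2.headD 0

-- per-prefix total over a list
def pvSum (L : List (String × String × List Int)) (p : String) : Int :=
  (L.filter (fun e => e.1 == p)).foldl (fun acc e => acc + pvHead e) 0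

-- A's fold with the lookup already resolved to pvHead
def pvFoldA (L : List (String × String × List Int)) : PySem.Dict String Int :=
  L.foldl
    (fun tot e =>
      if tot.contains e.1 then tot.insert e.1 (tot.getD e.1 0 + pvHead e)
      else tot.insert e.1 (pvHead e))
    PySem.Dict.empty

lemma pvSum_append_singleton (L : List (String × String × List Int)) (e : String × String × List Int) (p : String) :
    pvSum (L ++ [e]) p = pvSum L p + (if e.1 = p then pvHead e else 0) := by
  by_cases h : e.1 = p <;>
    simp [pvSum, List.filter_append, List.foldl_append, h]

lemma pvSum_eq_zero_of_not_mem (L : List (String × String × List Int)) (p : String)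
    (h : p ∉ L.map (fun e => e.1)) : pvSum L p = 0 := by
  have : L.filter (fun e => e.1 == p) = [] := by
    rw [List.filter_eq_nil_iff]
    intro e he hbe
    exact h (List.mem_map.mpr ⟨e, he, by simpa using hbe⟩)
  simp [pvSum, this]

lemma pvFoldA_items (L : List (String × String × List Int)) :
    (pvFoldA L).items =
      (PySem.Set.ofList (L.map (fun e => e.1))).map (fun p => (p, pvSum L p)) := by
  induction L using List.reverseRecOn with
  | nil => simp [pvFoldA, PySem.Set.ofList_nil, PySem.Dict.empty]
  | append_singleton L e ih =>
    have hps : PySem.Set.ofList ((L ++ [e]).map (fun e => e.1)) =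
        PySem.Set.add (PySem.Set.ofList (L.map (fun e => e.1))) e.1 := by
      rw [List.map_append, List.map_cons, List.map_nil, PySem.Set.ofList_append_singleton]
    set ps := PySem.Set.ofList (L.map (fun e => e.1)) with hpsdef
    have hnd : ps.Nodup := PySem.Set.nodup_ofList _
    have hkeys : (pvFoldA L).keys = ps := by
      rw [PySem.Dict.keys, ih, List.map_map]
      exact (List.map_congr_left fun p _ => rfl).trans (List.map_id _)
    have hstep : pvFoldA (L ++ [e]) =
        (if (pvFoldA L).contains e.1 then
           (pvFoldA L).insert e.1 ((pvFoldA L).getD e.1 0 + pvHead e)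
         else (pvFoldA L).insert e.1 (pvHead e)) := by
      simp [pvFoldA, List.foldl_append]
    by_cases hmem : e.1 ∈ ps
    · have hcont : (pvFoldA L).contains e.1 = true := by
        rw [PySem.Dict.contains_iff_mem_keys, hkeys]; exact hmem
      have hget : (pvFoldA L).getD e.1 0 = pvSum L e.1 := by
        apply PySem.Dict.getD_of_mem_items
        · rw [ih]; exact List.mem_map.mpr ⟨e.1, hmem, rfl⟩
        · rw [hkeys]; exact hnd
      rw [hstep, if_pos hcont, hps, PySem.Set.add_of_mem hmem,
        PySem.Dict.items_insert_of_contains _ _ hcont, ih, hget, List.map_map]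
      apply List.map_congr_left
      intro p hp
      by_cases hpe : p = e.1
      · subst hpe
        simp [pvSum_append_singleton]
      · have hep : ¬ e.1 = p := fun h => hpe h.symm
        simp [pvSum_append_singleton, hep, hpe]
    · have hcont : (pvFoldA L).contains e.1 = false := by
        rw [← Bool.not_eq_true, PySem.Dict.contains_iff_mem_keys, hkeys]; exact hmem
      rw [hstep, if_neg (by simp [hcont]), hps, PySem.Set.add_of_not_mem hmem,
        PySem.Dict.items_insert_of_not_contains _ _ hcont, ih, List.map_append]
      congr 1
      · apply List.map_congr_left
        intro p hp
        have hpe : ¬ e.1 = p := fun h => hmem (h ▸ hp)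
        simp [pvSum_append_singleton, hpe]
      · have h0 : pvSum L e.1 = 0 :=
          pvSum_eq_zero_of_not_mem L e.1 (fun h => hmem (by simpa [hpsdef, PySem.Set.mem_ofList] using h))
        simp [pvSum_append_singleton, h0]

-- under Pre_, A's in-loop lookup of entry e found in d returns e itself
lemma pvFind_eq (d : List (String × String × List Int))
    (hnd : (d.map (fun e => (e.1, e.2.1))).Nodup)
    (e : String × String × List Int) (he : e ∈ d) :
    d.find? (fun e' => e'.1 == e.1 && e'.2.1 == e.2.1) = some e := by
  induction d with
  | nil => cases he
  | cons a d ih =>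
    rcases List.mem_cons.mp he with rfl | he'
    · simp
    · have hnd' := (List.nodup_cons.mp hnd)
      have hne : (a.1 == e.1 && a.2.1 == e.2.1) = false := by
        by_contra h
        have h' : a.1 = e.1 ∧ a.2.1 = e.2.1 := by
          rcases Bool.and_eq_true_iff.mp (Bool.of_not_eq_false h) with ⟨h1, h2⟩
          exact ⟨by simpa using h1, by simpa using h2⟩
        have hmem : (a.1, a.2.1) ∈ List.map (fun e => (e.1, e.2.1)) d :=
          List.mem_map.mpr ⟨e, he', by rw [h'.1, h'.2]⟩
        exact hnd'.1 (by simpa using hmem)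
      rw [List.find?_cons, hne]
      exact ih hnd'.2 he'

lemma pvHead_eq (e : String × String × List Int) (h : e.2.2 ≠ []) :
    (PySem.List.pyGet? e.2.2 0).getD 0 = pvHead e := by
  cases hx : e.2.2 with
  | nil => exact absurd hx h
  | cons x xs => simp [pvHead, hx]

-- ===== VERDICT (by name: the statement is the Claim_ definition above) =====
theorem calculaTotal_spec : Claim_equal_calculaTotal := by
  intro d _hdom hpre
  obtain ⟨hnd, hne⟩ := hpre
  unfold Spec_calculaTotal
  have hA : calculaTotal d = (pvFoldA d).items := by
    unfold calculaTotal pvFoldA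
    congr 1
    apply PySem.List.foldl_congr_mem
    intro tot e he
    rw [pvFind_eq d hnd e he]
    simp only [Option.map_some, Option.getD_some]
    rw [pvHead_eq e (hne e he)]
  have hB : calculaTotal_alt d =
      (PySem.Set.ofList (d.map (fun e => e.1))).map (fun p => (p, pvSum d p)) := by
    unfold calculaTotal_alt
    have hpref : d.foldl (fun ps chave => PySem.Set.add ps chave.1) PySem.Set.empty =
        PySem.Set.ofList (d.map (fun e => e.1)) := by
      rw [← PySem.Set.update_map_eq_foldl_add]
      exact PySem.Set.update_nil_left _
    rw [hpref]
    apply List.map_congr_left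
    intro p _
    congr 1
    unfold pvSum
    apply PySem.List.foldl_congr_mem
    intro acc e he
    rw [pvHead_eq e (hne e (List.mem_of_mem_filter he))]
  rw [hA, hB, pvFoldA_items]
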